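-- pv_equiv track=rewrite | github.com/Carlyx/al_project | AI_project/views.py | sortt
-- ===== SOURCE A (Python) =====
-- def sortt(li):
--     l1 = []
--     l2 = []
--     o = 0
--     for i in li:
--         o = max(len(i),o)
--     for i in li:
--         if len(i)<o:
--             l1.append(i)
--         else:
--             l2.append(i)
--     l1.sort()
--     l2.sort()
--     for i in l2:
--         l1.append(i)
--     return l1
-- ===== SOURCE B (Python) =====
-- def sortt(li):
--     o = max((len(s) for s in li), default=0)
--     return sorted(li, key=lambda s: (len(s) == o, s))
-- ===== Notes on version B (the rewrite author's own statement) =====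
-- stated objective: simpler
-- what changed: Replaces the explicit partition into two lists, two separate sorts and a concatenation loop by a single stable sort with the composite key (len(s) == o, s), where o is the maximum length.
import Mathlib
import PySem

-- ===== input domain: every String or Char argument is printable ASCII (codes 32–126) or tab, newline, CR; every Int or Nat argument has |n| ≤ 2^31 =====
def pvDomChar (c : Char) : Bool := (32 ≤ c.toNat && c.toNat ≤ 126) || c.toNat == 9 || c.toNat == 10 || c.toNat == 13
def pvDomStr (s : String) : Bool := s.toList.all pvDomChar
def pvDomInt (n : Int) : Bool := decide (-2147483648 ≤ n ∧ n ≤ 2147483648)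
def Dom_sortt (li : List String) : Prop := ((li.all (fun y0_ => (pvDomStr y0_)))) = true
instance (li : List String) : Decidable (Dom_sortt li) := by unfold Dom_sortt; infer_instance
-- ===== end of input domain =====

-- B replaces A's partition-into-two-lists + two sorts + concatenation loop by one stable
-- sort with the composite key (len(s) == o, s); objective: simpler. Equal return value proved below.

-- ===== PORT A =====
def sortt (li : List String) : List String :=
  -- o = 0; for i in li: o = max(len(i), o)
  let o : Int := li.foldl (fun o i => max (PySem.Str.len i) o) 0
  -- for i in li: if len(i) < o: l1.append(i) else: l2.append(i)
  let p : List String × List String :=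
    li.foldl (fun (p : List String × List String) i =>
      if PySem.Str.len i < o then (p.1 ++ [i], p.2) else (p.1, p.2 ++ [i])) ([], [])
  -- l1.sort(); l2.sort()
  let l1 := PySem.List.sorted p.1 (fun x => x)
  let l2 := PySem.List.sorted p.2 (fun x => x)
  -- for i in l2: l1.append(i)
  l2.foldl (fun acc i => acc ++ [i]) l1

-- ===== PORT B =====
def sortt_alt (li : List String) : List String :=
  -- o = max((len(s) for s in li), default=0)
  let o : Int := PySem.List.maxD (li.map PySem.Str.len) (fun x => x) 0
  -- sorted(li, key=lambda s: (len(s) == o, s))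
  PySem.List.sorted2 li (fun s => decide (PySem.Str.len s = o)) (fun s => s)

-- ===== PRECONDITION & SPEC =====
def Spec_sortt (li : List String) (out : List String) : Prop := out = sortt_alt li
instance (li : List String) (out : List String) : Decidable (Spec_sortt li out) := by unfold Spec_sortt; infer_instance

-- ===== CLAIM (what is proved, stated in full; the proofs are below) =====
def Claim_equal_sortt : Prop := ∀ (li : List String), Dom_sortt li → Spec_sortt li (sortt li)

-- ===== LEMMAS AND PROOFS =====

-- the composite key of B, valued in the lexicographic order on Bool × String
def pvKey (o : Int) (s : String) : Lex (Bool × String) := toLex (decide (PySem.Str.len s = o), s)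

theorem pvKey_injective (o : Int) : Function.Injective (pvKey o) := by
  intro a b h
  exact congrArg (fun x => (ofLex x).2) h

-- B's sorted2 with the boolean first key is the stable sort by the lexicographic key
theorem sorted2_eq_sorted_pvKey (xs : List String) (o : Int) :
    PySem.List.sorted2 xs (fun s => decide (PySem.Str.len s = o)) (fun s => s)
      = PySem.List.sorted xs (pvKey o) := by
  rw [PySem.List.sorted_eq_foldl_insertBy]
  show List.foldl (fun acc x => PySem.List.insertBy _ x acc) [] xs = _
  congr 1
  funext acc x
  congr 1
  funext a b
  by_cases h1 : PySem.Str.len a = o <;> by_cases h2 : PySem.Str.len b = o <;>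
    simp [pvKey, Prod.Lex.lt_iff, PySem.Str.len_eq] at h1 h2 ⊢ <;> simp [h1, h2]

-- A's running max equals B's max(default=0), and bounds every length
theorem pvMax_eq (li : List String) :
    li.foldl (fun o i => max (PySem.Str.len i) o) 0
      = PySem.List.maxD (li.map PySem.Str.len) (fun x => x) 0 := by
  have hswap : (fun (o : Int) (i : String) => max (PySem.Str.len i) o)
      = (fun (o : Int) (i : String) => max o (PySem.Str.len i)) := by
    funext o i; exact max_comm _ _
  rw [hswap]
  cases li with
  | nil => simp [PySem.List.maxD, PySem.List.max?]
  | cons x t =>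
      have hx : (0 : Int) ≤ PySem.Str.len x := by
        simp [PySem.Str.len_eq]
      simp only [List.foldl_cons, List.map_cons]
      rw [max_eq_right hx]
      rw [show PySem.List.maxD (PySem.Str.len x :: t.map PySem.Str.len) (fun x => x) 0
            = ((PySem.List.max? (PySem.Str.len x :: t.map PySem.Str.len) (fun x => x)).getD 0) from rfl]
      rw [PySem.List.max?_id_cons]
      simp [List.foldl_map]

theorem pvMax_isMax (li : List String) :
    ∀ x ∈ li, PySem.Str.len x ≤ li.foldl (fun o i => max (PySem.Str.len i) o) 0 := by
  have hswap : (fun (o : Int) (i : String) => max (PySem.Str.len i) o)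
      = (fun (o : Int) (i : String) => max o (PySem.Str.len i)) := by
    funext o i; exact max_comm _ _
  rw [hswap]
  exact (PySem.List.le_foldl_max_int li PySem.Str.len 0).2

-- A's partition loop computes the two filters
theorem pvPartition_gen (o : Int) (li : List String) :
    ∀ (a b : List String),
      li.foldl (fun (p : List String × List String) i =>
          if PySem.Str.len i < o then (p.1 ++ [i], p.2) else (p.1, p.2 ++ [i])) (a, b)
        = (a ++ li.filter (fun i => decide (PySem.Str.len i < o)),
           b ++ li.filter (fun i => !decide (PySem.Str.len i < o))) := by
  induction li with
  | nil => intro a b; simp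
  | cons x t ih =>
      intro a b
      by_cases h : PySem.Str.len x < o
      · rw [List.foldl_cons, if_pos h, ih, List.filter_cons, List.filter_cons]
        simp [PySem.Str.len_eq] at h
        simp [h]
      · rw [List.foldl_cons, if_neg h, ih, List.filter_cons, List.filter_cons]
        simp [PySem.Str.len_eq] at h
        simp [h]

theorem pvPartition (li : List String) (o : Int) :
    li.foldl (fun (p : List String × List String) i =>
        if PySem.Str.len i < o then (p.1 ++ [i], p.2) else (p.1, p.2 ++ [i])) ([], [])
      = (li.filter (fun i => decide (PySem.Str.len i < o)),
         li.filter (fun i => !decide (PySem.Str.len i < o))) := by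
  simpa using pvPartition_gen o li [] []

theorem sortt_spec_aux (li : List String) : sortt li = sortt_alt li := by
  unfold sortt sortt_alt
  rw [PySem.List.foldl_append_singleton, ← pvMax_eq li, pvPartition, sorted2_eq_sorted_pvKey]
  set o : Int := li.foldl (fun o i => max (PySem.Str.len i) o) 0 with ho
  set f1 := li.filter (fun i => decide (PySem.Str.len i < o)) with hf1
  set f2 := li.filter (fun i => !decide (PySem.Str.len i < o)) with hf2
  apply PySem.List.eq_of_perm_of_pairwise_le_of_injective (pvKey o) (pvKey_injective o)
  · -- permutation
    exact ((PySem.List.sorted_perm f1 _ _).append (PySem.List.sorted_perm f2 _ _)).trans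
      ((List.filter_append_perm _ li).trans (PySem.List.sorted_perm li _ _).symm)
  · -- A's side is key-sorted
    have hkey1 : ∀ a ∈ PySem.List.sorted f1 (fun x => x) false,
        decide (PySem.Str.len a = o) = false := by
      intro a ha
      rw [PySem.List.mem_sorted] at ha
      have hlt : PySem.Str.len a < o := by
        simpa using List.of_mem_filter (p := fun i => decide (PySem.Str.len i < o)) ha
      rw [decide_eq_false_iff_not]
      exact ne_of_lt hlt
    have hkey2 : ∀ a ∈ PySem.List.sorted f2 (fun x => x) false,
        decide (PySem.Str.len a = o) = true := by
      intro a ha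
      rw [PySem.List.mem_sorted] at ha
      have h1 : ¬ PySem.Str.len a < o := by
        simpa using List.of_mem_filter (p := fun i => !decide (PySem.Str.len i < o)) ha
      have h2 := pvMax_isMax li a (List.mem_of_mem_filter ha)
      rw [decide_eq_true_eq]
      exact le_antisymm h2 (not_lt.mp h1)
    rw [List.pairwise_append]
    refine ⟨?_, ?_, ?_⟩
    · refine (PySem.List.sorted_pairwise f1 (fun x => x)).imp_of_mem ?_
      intro a b ha hb hab
      simp only [Prod.Lex.le_iff, pvKey, ofLex_toLex]
      exact Or.inr ⟨by rw [hkey1 a ha, hkey1 b hb], hab⟩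
    · refine (PySem.List.sorted_pairwise f2 (fun x => x)).imp_of_mem ?_
      intro a b ha hb hab
      simp only [Prod.Lex.le_iff, pvKey, ofLex_toLex]
      exact Or.inr ⟨by rw [hkey2 a ha, hkey2 b hb], hab⟩
    · intro a ha b hb
      rw [Prod.Lex.le_iff]
      refine Or.inl ?_
      show (decide (PySem.Str.len a = o)) < (decide (PySem.Str.len b = o))
      rw [hkey1 a ha, hkey2 b hb]
      decide
  · -- B's side is key-sorted
    exact PySem.List.sorted_pairwise li (pvKey o)

-- ===== VERDICT (by name: the statement is the Claim_ definition above) =====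
theorem sortt_spec : Claim_equal_sortt := by
  intro li _
  exact sortt_spec_aux li
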